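-- pv_equiv track=rewrite | github.com/Grabot/pubquiz_answer_checker | app/line_segmentation.py | find_corners_contour
-- ===== SOURCE A (Python) =====
-- import operator
--
-- def find_corners_contour(polygon, offset=0, add_x=False):
--     """
--     returns the 4 corners of the given polygon.
--     If the points are within a certain range we will save it
--     """
--     bottom_right, _ = max(enumerate([pt[0][0] + pt[0][1] for pt in polygon]), key=operator.itemgetter(1))
--     top_left, _ = min(enumerate([pt[0][0] + pt[0][1] for pt in polygon]), key=operator.itemgetter(1))
--     bottom_left, _ = min(enumerate([pt[0][0] - pt[0][1] for pt in polygon]), key=operator.itemgetter(1))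
--     top_right, _ = max(enumerate([pt[0][0] - pt[0][1] for pt in polygon]), key=operator.itemgetter(1))
--
--     if add_x:
--         # TODO Make the (width-1500) a bit more nicer (if you change it in 1 place you might forget it here)
--         polygon[top_left][0][0] = polygon[top_left][0][0] + offset
--         polygon[top_right][0][0] = polygon[top_right][0][0] + offset
--         polygon[bottom_right][0][0] = polygon[bottom_right][0][0] + offset
--         polygon[bottom_left][0][0] = polygon[bottom_left][0][0] + offset
--
--     return [polygon[top_left][0], polygon[top_right][0], polygon[bottom_right][0], polygon[bottom_left][0]]
-- ===== SOURCE B (Python) =====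
-- def find_corners_contour(polygon, offset=0, add_x=False):
--     """
--     returns the 4 corners of the given polygon.
--     Single pass over the polygon instead of four comprehension+min/max passes.
--     Strict comparisons preserve first-occurrence tie-breaking.
--     (Like the original, mutates polygon in place when add_x is true.)
--     """
--     p0 = polygon[0][0]
--     s0 = p0[0] + p0[1]
--     d0 = p0[0] - p0[1]
--     s_max, bottom_right = s0, 0
--     s_min, top_left = s0, 0
--     d_min, bottom_left = d0, 0
--     d_max, top_right = d0, 0
--     for i in range(1, len(polygon)):
--         p = polygon[i][0]
--         s = p[0] + p[1]
--         d = p[0] - p[1]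
--         if s > s_max:
--             s_max, bottom_right = s, i
--         if s < s_min:
--             s_min, top_left = s, i
--         if d < d_min:
--             d_min, bottom_left = d, i
--         if d > d_max:
--             d_max, top_right = d, i
--
--     if add_x:
--         polygon[top_left][0][0] = polygon[top_left][0][0] + offset
--         polygon[top_right][0][0] = polygon[top_right][0][0] + offset
--         polygon[bottom_right][0][0] = polygon[bottom_right][0][0] + offset
--         polygon[bottom_left][0][0] = polygon[bottom_left][0][0] + offset
--
--     return [polygon[top_left][0], polygon[top_right][0], polygon[bottom_right][0], polygon[bottom_left][0]]
-- ===== Notes on version B (the rewrite author's own statement) =====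
-- stated objective: alternative
-- what changed: Replaces four separate comprehension + min/max-with-key passes by a single loop over the polygon that maintains the four extremal (value, index) trackers with strict comparisons (preserving first-occurrence tie-breaking).
import Mathlib
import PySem

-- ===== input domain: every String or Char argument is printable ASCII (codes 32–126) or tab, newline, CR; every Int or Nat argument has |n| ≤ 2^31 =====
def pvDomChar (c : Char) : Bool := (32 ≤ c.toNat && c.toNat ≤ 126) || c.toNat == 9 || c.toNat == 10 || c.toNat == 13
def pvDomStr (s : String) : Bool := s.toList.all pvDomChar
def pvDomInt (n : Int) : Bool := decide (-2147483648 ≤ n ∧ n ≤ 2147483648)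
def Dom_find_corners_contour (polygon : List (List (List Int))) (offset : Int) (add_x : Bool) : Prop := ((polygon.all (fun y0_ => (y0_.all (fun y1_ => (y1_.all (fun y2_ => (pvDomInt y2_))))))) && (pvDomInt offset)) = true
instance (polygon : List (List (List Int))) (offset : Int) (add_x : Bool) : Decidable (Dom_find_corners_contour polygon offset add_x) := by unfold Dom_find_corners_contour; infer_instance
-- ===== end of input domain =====

-- B replaces A's four separate comprehension+min/max passes by ONE loop maintaining the four
-- extremal (value, index) trackers (strict comparisons keep first-occurrence tie-breaking).
-- Both A and B mutate `polygon` in place when add_x; the theorems are about the return value,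
-- and both ports model that identical mutation the same way.

-- shared accessors / mutation / result construction (this code is literally identical in both Pythons)
-- pt[0][0] + pt[0][1]
def cornerSum (pt : List (List Int)) : Int :=
  (PySem.List.pyGetD (PySem.List.pyGetD pt 0 []) 0 0) + (PySem.List.pyGetD (PySem.List.pyGetD pt 0 []) 1 0)
-- pt[0][0] - pt[0][1]
def cornerDiff (pt : List (List Int)) : Int :=
  (PySem.List.pyGetD (PySem.List.pyGetD pt 0 []) 0 0) - (PySem.List.pyGetD (PySem.List.pyGetD pt 0 []) 1 0)
-- polygon[i][0][0] = polygon[i][0][0] + off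
def addOffAt (poly : List (List (List Int))) (i : Int) (off : Int) : List (List (List Int)) :=
  let pt := PySem.List.pyGetD poly i []
  let q := PySem.List.pyGetD pt 0 []
  PySem.List.pySetD poly i (PySem.List.pySetD pt 0 (PySem.List.pySetD q 0 (PySem.List.pyGetD q 0 0 + off)))
-- the trailing `if add_x: …` mutation block and the returned list (identical in A and B)
def cornersOut (poly : List (List (List Int))) (tl tr br bl : Int) (offset : Int) (add_x : Bool) : List (List Int) :=
  let poly := if add_x then
      addOffAt (addOffAt (addOffAt (addOffAt poly tl offset) tr offset) br offset) bl offset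
    else poly
  [ PySem.List.pyGetD (PySem.List.pyGetD poly tl []) 0 []
  , PySem.List.pyGetD (PySem.List.pyGetD poly tr []) 0 []
  , PySem.List.pyGetD (PySem.List.pyGetD poly br []) 0 []
  , PySem.List.pyGetD (PySem.List.pyGetD poly bl []) 0 [] ]

-- ===== PORT A =====
-- max(enumerate(xs), key=itemgetter(1)) / min(...): first extremal index; [] is unreachable
-- under Pre_ (Python raises ValueError there), 0 is a junk value.
def pyArgmax (xs : List Int) : Int :=
  match PySem.List.enumerate xs with
  | [] => 0
  | h :: t => (t.foldl (fun b p => if p.2 > b.2 then p else b) h).1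
def pyArgmin (xs : List Int) : Int :=
  match PySem.List.enumerate xs with
  | [] => 0
  | h :: t => (t.foldl (fun b p => if p.2 < b.2 then p else b) h).1

def find_corners_contour (polygon : List (List (List Int))) (offset : Int) (add_x : Bool) : List (List Int) :=
  let bottom_right := pyArgmax (polygon.map (fun pt => cornerSum pt))
  let top_left := pyArgmin (polygon.map (fun pt => cornerSum pt))
  let bottom_left := pyArgmin (polygon.map (fun pt => cornerDiff pt))
  let top_right := pyArgmax (polygon.map (fun pt => cornerDiff pt))
  cornersOut polygon top_left top_right bottom_right bottom_left offset add_x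

-- ===== PORT B =====
-- the single `for i in range(1, len(polygon))` loop of Source B; state = four (value, index) trackers
def bLoop : List (List (List Int)) → Int → (Int × Int) → (Int × Int) → (Int × Int) → (Int × Int) →
    (Int × Int) × (Int × Int) × (Int × Int) × (Int × Int)
  | [], _, mS, nS, nD, mD => (mS, nS, nD, mD)
  | pt :: rest, i, mS, nS, nD, mD =>
    let s := cornerSum pt
    let d := cornerDiff pt
    bLoop rest (i + 1)
      (if s > mS.1 then (s, i) else mS)
      (if s < nS.1 then (s, i) else nS)
      (if d < nD.1 then (d, i) else nD)
      (if d > mD.1 then (d, i) else mD)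

def find_corners_contour_alt (polygon : List (List (List Int))) (offset : Int) (add_x : Bool) : List (List Int) :=
  match polygon with
  | [] => []  -- Python B raises IndexError here; excluded by Pre_
  | pt0 :: rest =>
    let s0 := cornerSum pt0
    let d0 := cornerDiff pt0
    let r := bLoop rest 1 (s0, 0) (s0, 0) (d0, 0) (d0, 0)
    cornersOut polygon r.2.1.2 r.2.2.2.2 r.1.2 r.2.2.1.2 offset add_x

-- ===== PRECONDITION & SPEC =====
-- Pre_ excludes exactly the inputs where Python A raises: the empty polygon (ValueError from
-- max([])) and polygons containing a point pt with pt == [] or len(pt[0]) < 2 (IndexError).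
def Pre_find_corners_contour (polygon : List (List (List Int))) (offset : Int) (add_x : Bool) : Prop :=
  polygon ≠ [] ∧ ∀ pt ∈ polygon, pt ≠ [] ∧ 2 ≤ (pt.headD []).length
instance (polygon : List (List (List Int))) (offset : Int) (add_x : Bool) : Decidable (Pre_find_corners_contour polygon offset add_x) := by unfold Pre_find_corners_contour; infer_instance

def pvWitness_find_corners_contour : List (List (List Int)) × Int × Bool :=
  ([[[0, 0]], [[3, 1]], [[1, 3]]], 5, true)

def Spec_find_corners_contour (polygon : List (List (List Int))) (offset : Int) (add_x : Bool) (out : List (List Int)) : Prop := out = find_corners_contour_alt polygon offset add_x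
instance (polygon : List (List (List Int))) (offset : Int) (add_x : Bool) (out : List (List Int)) : Decidable (Spec_find_corners_contour polygon offset add_x out) := by unfold Spec_find_corners_contour; infer_instance

-- ===== CLAIM (what is proved, stated in full; the proofs are below) =====
def Claim_equal_find_corners_contour : Prop := ∀ (polygon : List (List (List Int))) (offset : Int) (add_x : Bool), Dom_find_corners_contour polygon offset add_x → Pre_find_corners_contour polygon offset add_x → Spec_find_corners_contour polygon offset add_x (find_corners_contour polygon offset add_x)

-- ===== LEMMAS AND PROOFS =====

-- the four step functions A's folds reduce to after fusing `map` into `enumerate`/`foldl`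
def stepMaxS (b : Int × Int) (p : Int × List (List Int)) : Int × Int :=
  if cornerSum p.2 > b.2 then (p.1, cornerSum p.2) else b
def stepMinS (b : Int × Int) (p : Int × List (List Int)) : Int × Int :=
  if cornerSum p.2 < b.2 then (p.1, cornerSum p.2) else b
def stepMinD (b : Int × Int) (p : Int × List (List Int)) : Int × Int :=
  if cornerDiff p.2 < b.2 then (p.1, cornerDiff p.2) else b
def stepMaxD (b : Int × Int) (p : Int × List (List Int)) : Int × Int :=
  if cornerDiff p.2 > b.2 then (p.1, cornerDiff p.2) else b

theorem enumerate_map {α β : Type} (f : α → β) :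
    ∀ (l : List α) (s : Int),
      PySem.List.enumerate (l.map f) s = (PySem.List.enumerate l s).map (fun p => (p.1, f p.2))
  | [], _ => by simp [PySem.List.enumerate_nil]
  | a :: l, s => by
      simp [PySem.List.enumerate_cons, enumerate_map f l (s + 1)]

-- B's single loop computes, componentwise, exactly A's four folds (with pairs swapped)
theorem bLoop_eq :
    ∀ (l : List (List (List Int))) (s : Int) (mS nS nD mD : Int × Int),
      bLoop l s mS nS nD mD =
        ( ((PySem.List.enumerate l s).foldl stepMaxS (mS.2, mS.1)).swap
        , ((PySem.List.enumerate l s).foldl stepMinS (nS.2, nS.1)).swap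
        , ((PySem.List.enumerate l s).foldl stepMinD (nD.2, nD.1)).swap
        , ((PySem.List.enumerate l s).foldl stepMaxD (mD.2, mD.1)).swap )
  | [], s, mS, nS, nD, mD => by simp [bLoop, PySem.List.enumerate_nil]
  | pt :: rest, s, mS, nS, nD, mD => by
      simp only [bLoop, PySem.List.enumerate_cons, List.foldl_cons,
        bLoop_eq rest (s + 1), stepMaxS, stepMinS, stepMinD, stepMaxD]
      split_ifs <;> rfl

theorem argmax_sum_cons (pt0 : List (List Int)) (rest : List (List (List Int))) :
    pyArgmax ((pt0 :: rest).map (fun pt => cornerSum pt)) =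
      ((PySem.List.enumerate rest 1).foldl stepMaxS (0, cornerSum pt0)).1 := by
  simp only [List.map_cons, pyArgmax, PySem.List.enumerate_cons, enumerate_map, List.foldl_map]
  rfl

theorem argmin_sum_cons (pt0 : List (List Int)) (rest : List (List (List Int))) :
    pyArgmin ((pt0 :: rest).map (fun pt => cornerSum pt)) =
      ((PySem.List.enumerate rest 1).foldl stepMinS (0, cornerSum pt0)).1 := by
  simp only [List.map_cons, pyArgmin, PySem.List.enumerate_cons, enumerate_map, List.foldl_map]
  rfl

theorem argmin_diff_cons (pt0 : List (List Int)) (rest : List (List (List Int))) :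
    pyArgmin ((pt0 :: rest).map (fun pt => cornerDiff pt)) =
      ((PySem.List.enumerate rest 1).foldl stepMinD (0, cornerDiff pt0)).1 := by
  simp only [List.map_cons, pyArgmin, PySem.List.enumerate_cons, enumerate_map, List.foldl_map]
  rfl

theorem argmax_diff_cons (pt0 : List (List Int)) (rest : List (List (List Int))) :
    pyArgmax ((pt0 :: rest).map (fun pt => cornerDiff pt)) =
      ((PySem.List.enumerate rest 1).foldl stepMaxD (0, cornerDiff pt0)).1 := by
  simp only [List.map_cons, pyArgmax, PySem.List.enumerate_cons, enumerate_map, List.foldl_map]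
  rfl

-- ===== VERDICT (by name: the statement is the Claim_ definition above) =====
theorem find_corners_contour_spec : Claim_equal_find_corners_contour := by
  intro polygon offset add_x _hDom hPre
  unfold Spec_find_corners_contour
  obtain ⟨hne, -⟩ := hPre
  cases polygon with
  | nil => exact absurd rfl hne
  | cons pt0 rest =>
    show find_corners_contour _ _ _ = _
    unfold find_corners_contour find_corners_contour_alt
    simp only [argmax_sum_cons, argmin_sum_cons, argmin_diff_cons, argmax_diff_cons,
      bLoop_eq, Prod.swap]
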